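-- pv_equiv track=rewrite | github.com/Hari31416/VidScribe | backend/app/services/transcript_conversion.py | vtt_to_srt
-- ===== SOURCE A (Python) =====
-- def vtt_to_srt(vtt_content):
--     srt_content = ""
--     lines = vtt_content.splitlines()
--     index = 1
--     i = 0
--
--     while i < len(lines):
--         line = lines[i].strip()
--         if "-->" in line:
--             start_time, end_time = line.split(" --> ")
--             start_time = start_time.replace(".", ",")
--             end_time = end_time.replace(".", ",")
--             srt_content += f"{index}\n{start_time} --> {end_time}\n"
--             index += 1
--             i += 1
--             while i < len(lines) and lines[i].strip() != "":
--                 srt_content += lines[i] + "\n"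
--                 i += 1
--             srt_content += "\n"
--         i += 1
--
--     return srt_content
-- ===== SOURCE B (Python) =====
-- def vtt_to_srt(vtt_content):
--     # Group lines into blank-delimited blocks first, then render each block's cue.
--     blocks = []
--     block = []
--     for line in vtt_content.splitlines():
--         if line.strip() == "":
--             blocks.append(block)
--             block = []
--         else:
--             block.append(line)
--     blocks.append(block)
--
--     srt_content = ""
--     index = 1
--     for blk in blocks:
--         for j, line in enumerate(blk):
--             stripped = line.strip()
--             if "-->" in stripped:
--                 start_time, end_time = stripped.split(" --> ")
--                 srt_content += f"{index}\n{start_time.replace('.', ',')} --> {end_time.replace('.', ',')}\n"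
--                 index += 1
--                 for text in blk[j + 1:]:
--                     srt_content += text + "\n"
--                 srt_content += "\n"
--                 break
--     return srt_content
-- ===== Notes on version B (the rewrite author's own statement) =====
-- stated objective: alternative
-- what changed: Replaces A's single index-jumping while-loop (with a nested inner while) by a two-phase pass: first group the lines into blank-delimited blocks, then render each block's first '-->' line as a cue and the lines after it as text.
-- outside the precondition, e.g. on vtt_to_srt('-->'): A raises ValueError, B raises ValueError; on vtt_to_srt(' --> '): A raises ValueError, B raises ValueError
import Mathlib
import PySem

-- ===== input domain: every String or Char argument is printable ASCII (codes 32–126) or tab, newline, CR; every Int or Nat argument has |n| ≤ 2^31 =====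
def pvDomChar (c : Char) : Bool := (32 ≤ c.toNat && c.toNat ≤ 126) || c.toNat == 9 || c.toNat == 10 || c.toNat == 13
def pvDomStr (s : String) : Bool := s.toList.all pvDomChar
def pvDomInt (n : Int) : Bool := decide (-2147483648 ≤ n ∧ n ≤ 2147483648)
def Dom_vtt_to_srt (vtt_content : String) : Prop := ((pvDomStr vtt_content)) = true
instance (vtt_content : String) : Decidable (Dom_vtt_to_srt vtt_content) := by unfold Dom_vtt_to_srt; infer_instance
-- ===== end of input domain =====

-- B regroups A's single index-jumping while-loop into a two-phase pass: split the lines into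
-- blank-delimited blocks first, then render each block's first arrow line as a cue
-- (objective: alternative decomposition, same output).

-- ===== PORT A =====
-- inner while-loop of A: consume text lines until a blank line (or end), appending "line\n"
def pvInnerA : List String → String → String × List String
  | [], acc => (acc, [])
  | l :: r, acc =>
    if PySem.Str.strip l = "" then (acc, l :: r)
    else pvInnerA r (acc ++ l ++ "\n")

theorem pvInnerA_snd_le : ∀ (r : List String) (acc : String), (pvInnerA r acc).2.length ≤ r.length := by
  intro r
  induction r with
  | nil => intro acc; simp [pvInnerA]
  | cons l t ih =>
    intro acc
    simp only [pvInnerA]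
    split
    · simp
    · exact Nat.le_succ_of_le (ih _)

-- outer while-loop of A
set_option maxHeartbeats 1000000 in
def pvGoA (lines : List String) (index : Int) (acc : String) : String :=
  match lines with
  | [] => acc
  | _l :: rest =>
    let line := PySem.Str.strip _l
    if PySem.Str.isIn "-->" line then
      match PySem.Str.split? line " --> " with
      | some [start_time, end_time] =>
        let st := PySem.Str.replace start_time "." ","
        let en := PySem.Str.replace end_time "." ","
        let acc1 := acc ++ PySem.Int.toStr index ++ "\n" ++ st ++ " --> " ++ en ++ "\n"
        let pr := pvInnerA rest acc1
        pvGoA pr.2.tail (index + 1) (pr.1 ++ "\n")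
      | _ => acc   -- Python raises ValueError here (unpacking); excluded by Pre_
    else pvGoA rest index acc
termination_by lines.length
decreasing_by
  · have h1 := pvInnerA_snd_le rest (acc ++ PySem.Int.toStr index ++ "\n" ++ PySem.Str.replace start_time "." "," ++ " --> " ++ PySem.Str.replace end_time "." "," ++ "\n")
    simp only [List.length_cons, List.length_tail]
    omega
  · simp only [List.length_cons]
    omega

def vtt_to_srt (vtt_content : String) : String :=
  pvGoA (PySem.Str.splitlines vtt_content) 1 ""

-- ===== PORT B =====
-- first loop of B: group the lines into blank-delimited blocks
def pvBlocks (ls : List String) : List (List String) :=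
  let pr := ls.foldl
    (fun (p : List (List String) × List String) line =>
      if PySem.Str.strip line = "" then (p.1 ++ [p.2], []) else (p.1, p.2 ++ [line]))
    ([], [])
  pr.1 ++ [pr.2]

-- B's inner 'for j, line in enumerate(blk): if "-->" in line.strip(): … break':
-- first arrow line (stripped) of a block, together with the lines after it (blk[j+1:])
def pvFindArrow : List String → Option (String × List String)
  | [] => none
  | l :: r =>
    if PySem.Str.isIn "-->" (PySem.Str.strip l) then some (PySem.Str.strip l, r)
    else pvFindArrow r

def vtt_to_srt_alt (vtt_content : String) : String :=
  ((pvBlocks (PySem.Str.splitlines vtt_content)).foldl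
    (fun (p : String × Int) blk =>
      match pvFindArrow blk with
      | none => p
      | some (stripped, rest) =>
        match PySem.Str.split? stripped " --> " with
        | some [start_time, end_time] =>
          let acc1 := p.1 ++ PySem.Int.toStr p.2 ++ "\n" ++ PySem.Str.replace start_time "." ","
                        ++ " --> " ++ PySem.Str.replace end_time "." "," ++ "\n"
          let acc2 := rest.foldl (fun a t => a ++ t ++ "\n") acc1
          (acc2 ++ "\n", p.2 + 1)
        | _ => p   -- Python raises ValueError here (unpacking); excluded by Pre_
    ) ("", 1)).1

-- ===== PRECONDITION & SPEC =====
-- helpers for Pre_ (independent of both ports): the blank-delimited blocks of the lines,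
-- and the first stripped arrow line of a block
def pvPreBlocks (cur : List String) : List String → List (List String)
  | [] => [cur]
  | l :: r =>
    if PySem.Str.strip l = "" then cur :: pvPreBlocks [] r
    else pvPreBlocks (cur ++ [l]) r

def pvHeadArrow? : List String → Option String
  | [] => none
  | l :: r =>
    if PySem.Str.isIn "-->" (PySem.Str.strip l) then some (PySem.Str.strip l)
    else pvHeadArrow? r

def pvBlockOK (blk : List String) : Bool :=
  match pvHeadArrow? blk with
  | none => true
  | some h => ((PySem.Str.split? h " --> ").getD []).length == 2

-- Pre_ excludes exactly the inputs on which Python A raises ValueError: those where, in some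
-- blank-delimited block of the lines, the first line containing "-->" does not split on
-- " --> " into exactly two parts (B raises the same ValueError there).
def Pre_vtt_to_srt (vtt_content : String) : Prop :=
  ∀ blk ∈ pvPreBlocks [] (PySem.Str.splitlines vtt_content), pvBlockOK blk = true
instance (vtt_content : String) : Decidable (Pre_vtt_to_srt vtt_content) := by
  unfold Pre_vtt_to_srt; infer_instance

def pvWitness_vtt_to_srt : String := "WEBVTT\n\n00:00:01.000 --> 00:00:02.500\nHello there\n\n00:00:03.000 --> 00:00:04.000\nBye"

def Spec_vtt_to_srt (vtt_content : String) (out : String) : Prop := out = vtt_to_srt_alt vtt_content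
instance (vtt_content : String) (out : String) : Decidable (Spec_vtt_to_srt vtt_content out) := by unfold Spec_vtt_to_srt; infer_instance

-- ===== CLAIM (what is proved, stated in full; the proofs are below) =====
def Claim_equal_vtt_to_srt : Prop := ∀ (vtt_content : String), Dom_vtt_to_srt vtt_content → Pre_vtt_to_srt vtt_content → Spec_vtt_to_srt vtt_content (vtt_to_srt vtt_content)

-- ===== LEMMAS AND PROOFS =====

-- the non-blank predicate
def pvP (l : String) : Bool := !(PySem.Str.strip l == "")

-- structural rendering of the block list (bridges pvGoA to B's fold)
def pvRender : List (List String) → Int → String → String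
  | [], _, acc => acc
  | blk :: bs, idx, acc =>
    match pvFindArrow blk with
    | none => pvRender bs idx acc
    | some (stripped, rest) =>
      match PySem.Str.split? stripped " --> " with
      | some [start_time, end_time] =>
        let acc1 := acc ++ PySem.Int.toStr idx ++ "\n" ++ PySem.Str.replace start_time "." ","
                      ++ " --> " ++ PySem.Str.replace end_time "." "," ++ "\n"
        let acc2 := rest.foldl (fun a t => a ++ t ++ "\n") acc1
        pvRender bs (idx + 1) (acc2 ++ "\n")
      | _ => pvRender bs idx acc

theorem pvRender_eq_foldl : ∀ (bs : List (List String)) (idx : Int) (acc : String),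
    pvRender bs idx acc =
      (bs.foldl (fun (p : String × Int) blk =>
        match pvFindArrow blk with
        | none => p
        | some (stripped, rest) =>
          match PySem.Str.split? stripped " --> " with
          | some [start_time, end_time] =>
            let acc1 := p.1 ++ PySem.Int.toStr p.2 ++ "\n" ++ PySem.Str.replace start_time "." ","
                          ++ " --> " ++ PySem.Str.replace end_time "." "," ++ "\n"
            let acc2 := rest.foldl (fun a t => a ++ t ++ "\n") acc1
            (acc2 ++ "\n", p.2 + 1)
          | _ => p) (acc, idx)).1 := by
  intro bs
  induction bs with
  | nil => intro idx acc; simp [pvRender]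
  | cons blk bs ih =>
    intro idx acc
    simp only [pvRender, List.foldl_cons]
    rcases h : pvFindArrow blk with _ | ⟨stripped, rest⟩
    · simp only [ih]
    · rcases hs : PySem.Str.split? stripped " --> " with _ | ⟨_ | ⟨a, _ | ⟨b, _ | _⟩⟩⟩ <;>
        simp only [hs, ih]

-- B's foldl-built block list equals the structural one
theorem pvBlocks_loop_eq : ∀ (ls : List String) (bs : List (List String)) (cur : List String),
    (ls.foldl (fun (p : List (List String) × List String) line =>
        if PySem.Str.strip line = "" then (p.1 ++ [p.2], []) else (p.1, p.2 ++ [line]))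
      (bs, cur)).1
    ++ [(ls.foldl (fun (p : List (List String) × List String) line =>
        if PySem.Str.strip line = "" then (p.1 ++ [p.2], []) else (p.1, p.2 ++ [line]))
      (bs, cur)).2]
    = bs ++ pvPreBlocks cur ls := by
  intro ls
  induction ls with
  | nil => intro bs cur; simp [pvPreBlocks]
  | cons l t ih =>
    intro bs cur
    simp only [List.foldl_cons, pvPreBlocks]
    split
    · rw [ih]; simp
    · rw [ih]

theorem pvBlocks_eq (ls : List String) : pvBlocks ls = pvPreBlocks [] ls := by
  simpa [pvBlocks] using pvBlocks_loop_eq ls [] []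

-- the characterisation of pvPreBlocks by takeWhile/dropWhile
theorem pvPreBlocks_eq : ∀ (t : List String) (cur : List String),
    pvPreBlocks cur t = (cur ++ t.takeWhile pvP) ::
      (match t.dropWhile pvP with
       | [] => []
       | _ :: r => pvPreBlocks [] r) := by
  intro t
  induction t with
  | nil => intro cur; simp [pvPreBlocks]
  | cons l r ih =>
    intro cur
    simp only [pvPreBlocks]
    by_cases h : PySem.Str.strip l = ""
    · have hp : pvP l = false := by simp [pvP, h]
      simp [h, hp]
    · have hp : pvP l = true := by simp [pvP, h]
      rw [if_neg h, ih]
      simp [hp]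

-- inner while-loop of A = fold over the non-blank prefix, remainder = dropWhile
theorem pvInnerA_eq : ∀ (r : List String) (acc : String),
    pvInnerA r acc = ((r.takeWhile pvP).foldl (fun a t => a ++ t ++ "\n") acc, r.dropWhile pvP) := by
  intro r
  induction r with
  | nil => intro acc; simp [pvInnerA]
  | cons l t ih =>
    intro acc
    simp only [pvInnerA]
    by_cases h : PySem.Str.strip l = ""
    · have hp : pvP l = false := by simp [pvP, h]
      simp [h, hp]
    · have hp : pvP l = true := by simp [pvP, h]
      rw [if_neg h, ih]
      simp [hp]

theorem pvHeadArrow_findArrow (blk : List String) :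
    pvHeadArrow? blk = (pvFindArrow blk).map Prod.fst := by
  induction blk with
  | nil => simp [pvHeadArrow?, pvFindArrow]
  | cons l r ih =>
    simp only [pvHeadArrow?, pvFindArrow]
    split <;> simp [ih]

theorem pv_no_arrow_empty : PySem.Str.isIn "-->" "" = false := by decide

-- main bridge: A's loop = structural rendering of the block decomposition
set_option maxHeartbeats 3200000 in
theorem pvGoA_eq_render : ∀ (n : Nat) (t : List String), t.length ≤ n →
    (∀ blk ∈ pvPreBlocks [] t, pvBlockOK blk = true) →
    ∀ (idx : Int) (acc : String), pvGoA t idx acc = pvRender (pvPreBlocks [] t) idx acc := by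
  intro n
  induction n with
  | zero =>
    intro t ht _ idx acc
    have : t = [] := List.eq_nil_of_length_eq_zero (Nat.le_zero.mp ht)
    subst this
    simp [pvGoA, pvPreBlocks, pvRender, pvFindArrow]
  | succ n ih =>
    intro t ht hok idx acc
    match t with
    | [] => simp [pvGoA, pvPreBlocks, pvRender, pvFindArrow]
    | l :: rest =>
      by_cases hb : PySem.Str.strip l = ""
      · -- blank line: both skip
        have harr : PySem.Str.isIn "-->" (PySem.Str.strip l) = false := by
          rw [hb]; exact pv_no_arrow_empty
        rw [pvGoA]
        simp only [harr, Bool.false_eq_true, if_false]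
        have hblocks : pvPreBlocks [] (l :: rest) = [] :: pvPreBlocks [] rest := by
          simp [pvPreBlocks, hb]
        rw [hblocks] at hok ⊢
        rw [pvRender]
        simp only [pvFindArrow]
        exact ih rest (by simp only [List.length_cons] at ht; omega)
          (fun blk hm => hok blk (List.mem_cons_of_mem _ hm)) idx acc
      · -- non-blank line
        have hblocks : pvPreBlocks [] (l :: rest) = pvPreBlocks [l] rest := by
          simp [pvPreBlocks, hb]
        have hdecomp := pvPreBlocks_eq rest [l]
        have hdecomp0 := pvPreBlocks_eq rest []
        by_cases ha : PySem.Str.isIn "-->" (PySem.Str.strip l) = true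
        · -- arrow header line
          have hokhead : pvBlockOK (l :: rest.takeWhile pvP) = true := by
            apply hok
            rw [hblocks, hdecomp]
            exact List.mem_cons_self
          have hlen2 : (((PySem.Str.split? (PySem.Str.strip l) " --> ").getD []).length = 2) := by
            unfold pvBlockOK at hokhead
            rw [show pvHeadArrow? (l :: rest.takeWhile pvP) = some (PySem.Str.strip l) by
              simp only [pvHeadArrow?, ha, if_true]] at hokhead
            simpa using hokhead
          rcases hs : PySem.Str.split? (PySem.Str.strip l) " --> " with _ | ⟨_ | ⟨a, _ | ⟨b, _ | ⟨c, _⟩⟩⟩⟩ <;>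
            simp only [hs, Option.getD_some, Option.getD_none, List.length_nil, List.length_cons] at hlen2 <;>
            try omega
          -- unfold pvGoA one step
          rw [pvGoA]
          simp only [ha, if_true, hs]
          rw [pvInnerA_eq]
          -- right-hand side
          rw [hblocks, hdecomp]
          rw [pvRender]
          have hfind : pvFindArrow ([l] ++ rest.takeWhile pvP) = some (PySem.Str.strip l, rest.takeWhile pvP) := by
            simp only [List.singleton_append, pvFindArrow, ha, if_true]
          simp only [hfind, hs]
          -- remaining: recurse on the tail after the blank
          rcases hd : rest.dropWhile pvP with _ | ⟨bl, r⟩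
          · simp only [List.tail_nil]
            rw [pvGoA, pvRender]
          · simp only [List.tail_cons]
            have hlr : r.length ≤ n := by
              have h1 : (rest.dropWhile pvP).length ≤ rest.length := List.length_dropWhile_le _ _
              rw [hd] at h1
              simp only [List.length_cons] at h1 ht
              omega
            have hok' : ∀ blk ∈ pvPreBlocks [] r, pvBlockOK blk = true := by
              intro blk hm
              apply hok
              rw [hblocks, hdecomp, hd]
              exact List.mem_cons_of_mem _ hm
            exact ih r hlr hok' (idx + 1) _
        · -- non-arrow, non-blank line: skipped by A, absorbed into the block by B
          have ha' : PySem.Str.isIn "-->" (PySem.Str.strip l) = false := by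
            simpa using ha
          rw [pvGoA]
          simp only [ha', Bool.false_eq_true, if_false]
          have hok0 : ∀ blk ∈ pvPreBlocks [] rest, pvBlockOK blk = true := by
            intro blk hm
            rw [hdecomp0] at hm
            rcases List.mem_cons.mp hm with h | h
            · subst h
              have := hok _ (by rw [hblocks, hdecomp]; exact List.mem_cons_self)
              unfold pvBlockOK at this ⊢
              rw [pvHeadArrow_findArrow] at this ⊢
              rw [show pvFindArrow ([l] ++ List.takeWhile pvP rest) = pvFindArrow (List.takeWhile pvP rest) by
                simp only [List.singleton_append, pvFindArrow, ha', Bool.false_eq_true, if_false]] at this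
              simpa using this
            · exact hok _ (by rw [hblocks, hdecomp, hdecomp0] at *; exact List.mem_cons_of_mem _ h)
          rw [ih rest (by simp only [List.length_cons] at ht; omega) hok0 idx acc]
          rw [hblocks, hdecomp, hdecomp0]
          rw [pvRender, pvRender]
          rw [show pvFindArrow ([l] ++ List.takeWhile pvP rest) = pvFindArrow (List.takeWhile pvP rest) by
            simp only [List.singleton_append, pvFindArrow, ha', Bool.false_eq_true, if_false]]
          simp only [List.nil_append]

-- ===== VERDICT (by name: the statement is the Claim_ definition above) =====
theorem vtt_to_srt_spec : Claim_equal_vtt_to_srt := by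
  intro v _ hpre
  unfold Spec_vtt_to_srt vtt_to_srt vtt_to_srt_alt
  rw [pvBlocks_eq, ← pvRender_eq_foldl]
  exact pvGoA_eq_render (PySem.Str.splitlines v).length _ le_rfl hpre 1 ""
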